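-- pv_equiv track=rewrite | github.com/Hyeyeon-Kim/Algorithm | 프로그래머스/1/42840. 모의고사/모의고사.py | solution
-- ===== SOURCE A (Python) =====
-- def solution(answers):
--
--     one = [1, 2, 3, 4, 5]
--     two = [2, 1, 2, 3, 2, 4, 2, 5]
--     thre = [3, 3, 1, 1, 2, 2, 4, 4, 5, 5]
--
--     ans = {i: 0 for i in range(1, 4)}
--
--     for i, a in enumerate(answers):
--         if a == one[i % len(one)]:
--             ans[1] += 1
--         if a == two[i % len(two)]:
--             ans[2] += 1
--         if a == thre[i % len(thre)]:
--             ans[3] += 1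
--
--     max_ = max(ans.values())
--
--     answer = [a for a in ans if ans[a] == max_]
--
--
--     return sorted(answer, key = lambda k:ans[k])
-- ===== SOURCE B (Python) =====
-- def solution(answers):
--     # Single pass rotating the three cyclic patterns instead of modulo-indexing,
--     # then winners by direct comparisons (no dict, no max(), no sort).
--     p1 = [1, 2, 3, 4, 5]
--     p2 = [2, 1, 2, 3, 2, 4, 2, 5]
--     p3 = [3, 3, 1, 1, 2, 2, 4, 4, 5, 5]
--     s1 = s2 = s3 = 0
--     for a in answers:
--         if a == p1[0]:
--             s1 += 1
--         if a == p2[0]: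
--             s2 += 1
--         if a == p3[0]:
--             s3 += 1
--         p1 = p1[1:] + p1[:1]
--         p2 = p2[1:] + p2[:1]
--         p3 = p3[1:] + p3[:1]
--     m = s1 if s1 >= s2 else s2
--     m = m if m >= s3 else s3
--     winners = []
--     if s1 == m:
--         winners.append(1)
--     if s2 == m:
--         winners.append(2)
--     if s3 == m:
--         winners.append(3)
--     return winners
-- ===== Notes on version B (the rewrite author's own statement) =====
-- stated objective: alternative
-- what changed: Replaces A's enumerate+modulo indexing into fixed pattern lists with an index-free pass that rotates the three cyclic patterns one step per answer, and replaces A's dict/max()/filter/sort winner pipeline by direct comparisons building the winners list.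
import Mathlib
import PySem

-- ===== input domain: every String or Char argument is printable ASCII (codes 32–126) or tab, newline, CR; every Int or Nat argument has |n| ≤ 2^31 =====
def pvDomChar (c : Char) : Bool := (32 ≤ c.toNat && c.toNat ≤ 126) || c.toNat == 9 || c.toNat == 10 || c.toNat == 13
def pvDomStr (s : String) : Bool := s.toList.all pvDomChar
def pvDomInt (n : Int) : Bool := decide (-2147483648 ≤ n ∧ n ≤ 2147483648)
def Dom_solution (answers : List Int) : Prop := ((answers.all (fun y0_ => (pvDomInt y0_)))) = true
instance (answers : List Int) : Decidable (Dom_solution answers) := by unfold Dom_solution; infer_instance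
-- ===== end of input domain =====

-- B replaces A's enumerate+modulo pattern indexing by a single index-free pass that
-- rotates the three cyclic patterns one step per answer, and A's dict/max()/filter/sort
-- winner pipeline by direct comparisons (alternative decomposition, same cost).

-- ===== PORT A =====
-- A's loop body, named so the fold can be reasoned about; it is A's three ifs verbatim.
-- one[i % len(one)]: i ≥ 0 and the pattern lists are non-empty, so the index is always
-- in range; pyGetD with default 0 is exact here. ans[k] += 1 on an always-present key
-- is Dict.modify; max(ans.values()) on the always-3-element dict is max?.getD 0.
def pvStep (d : PySem.Dict Int Int) (ia : Int × Int) : PySem.Dict Int Int :=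
  let d := if ia.2 == PySem.List.pyGetD [1, 2, 3, 4, 5] (PySem.Int.mod ia.1 (PySem.List.len [1, 2, 3, 4, 5])) 0
           then d.modify 1 0 (· + 1) else d
  let d := if ia.2 == PySem.List.pyGetD [2, 1, 2, 3, 2, 4, 2, 5] (PySem.Int.mod ia.1 (PySem.List.len [2, 1, 2, 3, 2, 4, 2, 5])) 0
           then d.modify 2 0 (· + 1) else d
  if ia.2 == PySem.List.pyGetD [3, 3, 1, 1, 2, 2, 4, 4, 5, 5] (PySem.Int.mod ia.1 (PySem.List.len [3, 3, 1, 1, 2, 2, 4, 4, 5, 5])) 0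
  then d.modify 3 0 (· + 1) else d

def solution (answers : List Int) : List Int :=
  let ans0 : PySem.Dict Int Int :=
    (PySem.List.pyRange 1 4 1).foldl (fun d i => d.insert i 0) PySem.Dict.empty
  let ans : PySem.Dict Int Int := (PySem.List.enumerate answers 0).foldl pvStep ans0
  let max_ : Int := (PySem.List.max? ans.values (fun v => v)).getD 0
  let answer : List Int := ans.keys.filter (fun a => ans.getD a 0 == max_)
  PySem.List.sorted answer (fun k => ans.getD k 0) false

-- ===== PORT B =====
-- B's loop body: compare the answer with the current head of each rotating pattern
-- (p[0]; the patterns stay non-empty under rotation, so headD 0 is exact), bump the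
-- matching scores, then rotate each pattern one step (p[1:] + p[:1] = drop 1 ++ take 1,
-- exact for these non-negative slice bounds).
def pvStepB (st : (List Int × List Int × List Int) × (Int × Int × Int)) (a : Int) :
    (List Int × List Int × List Int) × (Int × Int × Int) :=
  let s1 := if a == st.1.1.headD 0 then st.2.1 + 1 else st.2.1
  let s2 := if a == st.1.2.1.headD 0 then st.2.2.1 + 1 else st.2.2.1
  let s3 := if a == st.1.2.2.headD 0 then st.2.2.2 + 1 else st.2.2.2
  ((st.1.1.drop 1 ++ st.1.1.take 1, st.1.2.1.drop 1 ++ st.1.2.1.take 1,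
    st.1.2.2.drop 1 ++ st.1.2.2.take 1), (s1, s2, s3))

def solution_alt (answers : List Int) : List Int :=
  let st := answers.foldl pvStepB
    (([1, 2, 3, 4, 5], [2, 1, 2, 3, 2, 4, 2, 5], [3, 3, 1, 1, 2, 2, 4, 4, 5, 5]),
     ((0 : Int), (0 : Int), (0 : Int)))
  let s1 := st.2.1
  let s2 := st.2.2.1
  let s3 := st.2.2.2
  let m := if s1 ≥ s2 then s1 else s2
  let m := if m ≥ s3 then m else s3
  (if s1 == m then [(1 : Int)] else []) ++ (if s2 == m then [2] else []) ++
    (if s3 == m then [3] else [])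

-- ===== PRECONDITION & SPEC =====
def Spec_solution (answers : List Int) (out : List Int) : Prop := out = solution_alt answers
instance (answers : List Int) (out : List Int) : Decidable (Spec_solution answers out) := by unfold Spec_solution; infer_instance

-- ===== CLAIM =====
def Claim_equal_solution : Prop := ∀ (answers : List Int), Dom_solution answers → Spec_solution answers (solution answers)

-- ===== LEMMAS AND PROOFS =====

-- the head of the k-th rotation of a non-empty pattern is Python's p[k % len(p)]
theorem pvHeadRotate (p : List Int) (hp : p ≠ []) (k : Nat) :
    (p.rotate k).headD 0 = PySem.List.pyGetD p (PySem.Int.mod (k : Int) (PySem.List.len p)) 0 := by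
  have hl : 0 < p.length := List.length_pos_iff.mpr hp
  have h0 : 0 < (p.rotate k).length := by simpa using hl
  rw [List.headD_eq_head?, List.head?_eq_some_head (List.ne_nil_of_length_pos h0),
    Option.getD_some, List.head_eq_getElem, List.getElem_rotate]
  simp only [PySem.List.len]
  rw [PySem.Int.mod_natCast, PySem.List.pyGetD_natCast]
  rw [List.getD_eq_getElem _ _ (Nat.mod_lt _ hl)]
  simp

-- B's one-step rotation advances the rotation counter
theorem pvRotSucc (p : List Int) (hp : p ≠ []) (k : Nat) :
    (p.rotate k).drop 1 ++ (p.rotate k).take 1 = p.rotate (k + 1) := by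
  rw [← List.rotate_eq_drop_append_take
    (by simpa using List.length_pos_iff.mpr hp : 1 ≤ (p.rotate k).length), List.rotate_rotate]

-- one step of A's loop on the 3-key dict bumps the three counters on their conditions
theorem pvStepEq (c1 c2 c3 : Int) (x : Int × Int) :
    pvStep (PySem.Dict.mk [(1, c1), (2, c2), (3, c3)]) x
    = PySem.Dict.mk
        [(1, if x.2 == PySem.List.pyGetD [1, 2, 3, 4, 5] (PySem.Int.mod x.1 (PySem.List.len [1, 2, 3, 4, 5])) 0 then c1 + 1 else c1),
         (2, if x.2 == PySem.List.pyGetD [2, 1, 2, 3, 2, 4, 2, 5] (PySem.Int.mod x.1 (PySem.List.len [2, 1, 2, 3, 2, 4, 2, 5])) 0 then c2 + 1 else c2),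
         (3, if x.2 == PySem.List.pyGetD [3, 3, 1, 1, 2, 2, 4, 4, 5, 5] (PySem.Int.mod x.1 (PySem.List.len [3, 3, 1, 1, 2, 2, 4, 4, 5, 5])) 0 then c3 + 1 else c3)] := by
  simp only [pvStep]
  split_ifs <;> rfl

-- A's fused modulo-indexed loop and B's rotating loop compute the same three scores,
-- in lockstep: A at enumerate index k corresponds to B with each pattern rotated k times.
theorem pvLoopEq (l : List Int) : ∀ (k : Nat) (c1 c2 c3 : Int),
    (PySem.List.enumerate l (k : Int)).foldl pvStep (PySem.Dict.mk [(1, c1), (2, c2), (3, c3)])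
    = PySem.Dict.mk
        [(1, (l.foldl pvStepB (([1, 2, 3, 4, 5].rotate k, [2, 1, 2, 3, 2, 4, 2, 5].rotate k,
              [3, 3, 1, 1, 2, 2, 4, 4, 5, 5].rotate k), (c1, c2, c3))).2.1),
         (2, (l.foldl pvStepB (([1, 2, 3, 4, 5].rotate k, [2, 1, 2, 3, 2, 4, 2, 5].rotate k,
              [3, 3, 1, 1, 2, 2, 4, 4, 5, 5].rotate k), (c1, c2, c3))).2.2.1),
         (3, (l.foldl pvStepB (([1, 2, 3, 4, 5].rotate k, [2, 1, 2, 3, 2, 4, 2, 5].rotate k,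
              [3, 3, 1, 1, 2, 2, 4, 4, 5, 5].rotate k), (c1, c2, c3))).2.2.2)] := by
  induction l with
  | nil => intro k c1 c2 c3; rfl
  | cons a l ih =>
    intro k c1 c2 c3
    rw [PySem.List.enumerate_cons, List.foldl_cons, pvStepEq, List.foldl_cons]
    have hcast : (k : Int) + 1 = ((k + 1 : Nat) : Int) := by push_cast; ring
    rw [hcast, ih (k + 1)]
    simp only [pvStepB,
      pvHeadRotate [1, 2, 3, 4, 5] (by simp) k,
      pvHeadRotate [2, 1, 2, 3, 2, 4, 2, 5] (by simp) k,
      pvHeadRotate [3, 3, 1, 1, 2, 2, 4, 4, 5, 5] (by simp) k,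
      pvRotSucc [1, 2, 3, 4, 5] (by simp) k,
      pvRotSucc [2, 1, 2, 3, 2, 4, 2, 5] (by simp) k,
      pvRotSucc [3, 3, 1, 1, 2, 2, 4, 4, 5, 5] (by simp) k]
    rfl

-- a sort whose key is constant on the list is the identity (stable sort)
theorem pvSortedConst (l : List Int) (f : Int → Int) (m : Int) (h : ∀ x ∈ l, f x = m) :
    PySem.List.sorted l f false = l := by
  apply PySem.List.sorted_eq_self_of_pairwise
  induction l with
  | nil => exact List.Pairwise.nil
  | cons x xs ih =>
    refine List.Pairwise.cons (fun y hy => ?_) (ih fun y hy => h y (List.mem_cons_of_mem _ hy))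
    rw [h x List.mem_cons_self, h y (List.mem_cons_of_mem _ hy)]

-- Python's max of the three values equals B's two chained comparisons
theorem pvMaxEq (S1 S2 S3 : Int) : (PySem.List.max? [S1, S2, S3] (fun v => v)).getD 0 =
    (if (if S1 ≥ S2 then S1 else S2) ≥ S3 then (if S1 ≥ S2 then S1 else S2) else S3) := by
  simp only [PySem.List.max?, List.foldl_cons, List.foldl_nil]
  split_ifs <;> simp_all <;> split_ifs <;> simp_all <;> omega

-- the common tail: from the three scores, both pipelines produce the winners in order
theorem pvFinalB (S1 S2 S3 : Int) :
    PySem.List.sorted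
      ((PySem.Dict.mk [((1 : Int), S1), (2, S2), (3, S3)]).keys.filter
        (fun a => (PySem.Dict.mk [((1 : Int), S1), (2, S2), (3, S3)]).getD a 0 ==
          (PySem.List.max? (PySem.Dict.mk [((1 : Int), S1), (2, S2), (3, S3)]).values (fun v => v)).getD 0))
      (fun k => (PySem.Dict.mk [((1 : Int), S1), (2, S2), (3, S3)]).getD k 0) false
    = (if S1 == (if (if S1 ≥ S2 then S1 else S2) ≥ S3 then (if S1 ≥ S2 then S1 else S2) else S3) then [(1 : Int)] else [])
      ++ (if S2 == (if (if S1 ≥ S2 then S1 else S2) ≥ S3 then (if S1 ≥ S2 then S1 else S2) else S3) then [2] else [])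
      ++ (if S3 == (if (if S1 ≥ S2 then S1 else S2) ≥ S3 then (if S1 ≥ S2 then S1 else S2) else S3) then [3] else []) := by
  have hv : (PySem.Dict.mk [((1 : Int), S1), (2, S2), (3, S3)]).values = [S1, S2, S3] := rfl
  simp only [hv, pvMaxEq]
  set m : Int := (if (if S1 ≥ S2 then S1 else S2) ≥ S3 then (if S1 ≥ S2 then S1 else S2) else S3) with hm
  rw [pvSortedConst _ _ m (by
    intro x hx
    rw [List.mem_filter] at hx
    exact eq_of_beq hx.2)]
  have hk : (PySem.Dict.mk [((1 : Int), S1), (2, S2), (3, S3)]).keys = [(1 : Int), 2, 3] := rfl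
  have q1 : (PySem.Dict.mk [((1 : Int), S1), (2, S2), (3, S3)]).getD 1 0 = S1 := rfl
  have q2 : (PySem.Dict.mk [((1 : Int), S1), (2, S2), (3, S3)]).getD 2 0 = S2 := rfl
  have q3 : (PySem.Dict.mk [((1 : Int), S1), (2, S2), (3, S3)]).getD 3 0 = S3 := rfl
  rw [hk]
  simp only [List.filter_cons, List.filter_nil, q1, q2, q3]
  by_cases w1 : S1 = m <;> by_cases w2 : S2 = m <;> by_cases w3 : S3 = m <;>
    simp [w1, w2, w3]

-- ===== VERDICT (by name: the statement is the Claim_ definition above) =====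
theorem solution_spec : Claim_equal_solution := by
  intro answers _
  show solution answers = solution_alt answers
  simp only [solution, solution_alt]
  rw [show (PySem.List.pyRange 1 4 1).foldl (fun d i => d.insert i 0) PySem.Dict.empty
        = PySem.Dict.mk [(1, (0 : Int)), (2, 0), (3, 0)] from rfl]
  rw [show ((0 : Int)) = ((0 : Nat) : Int) from rfl, pvLoopEq]
  simp only [List.rotate_zero]
  exact pvFinalB _ _ _
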